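-- pv_equiv track=rewrite | github.com/spin6lock/cache_oblivious_test | main.py | construct_bfs
-- ===== SOURCE A (Python) =====
-- def get_child(direction, item, sort_data):
--     if item[direction][0] > item[direction][1]:
--         return
--     child_index = (item[direction][0] + item[direction][1]) // 2
--     left = (item[direction][0], child_index-1)
--     right = (child_index + 1, item[direction][1])
--     val = sort_data[child_index]
--     return {
--             "val": val,
--             "left": left,
--             "right": right,
--         }
--
-- def construct_bfs(sort_data):
--     result = []
--     open_list = []
--     middle_index = len(sort_data) // 2
--     middle_val = sort_data[middle_index]
--     open_list.append({
--         "val": middle_val,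
--         "left": (0, middle_index - 1),
--         "right": (middle_index + 1, len(sort_data) - 1),
--         })
--     while len(open_list) != 0:
--         item = open_list.pop(0)
--         if item == -1:
--             result.append(item)
--             continue
--         else:
--             result.append(item["val"])
--         left_child = get_child("left", item, sort_data)
--         right_child = get_child("right", item, sort_data)
--         if left_child == right_child and right_child is None:
--             continue
--         if left_child:
--             open_list.append(left_child)
--         else:
--             open_list.append(-1)
--         if right_child:
--             open_list.append(right_child)
--         else:
--             open_list.append(-1)
--     return result
-- ===== SOURCE B (Python) =====
-- def construct_bfs(sort_data):
--     n = len(sort_data)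
--
--     def build(lo, hi):
--         if lo > hi:
--             return None
--         mid = (lo + hi) // 2
--         return (sort_data[mid], build(lo, mid - 1), build(mid + 1, hi))
--
--     mi = n // 2
--     root = (sort_data[mi], build(0, mi - 1), build(mi + 1, n - 1))
--     result = []
--     queue = [root]
--     i = 0
--     while i < len(queue):
--         item = queue[i]
--         i += 1
--         if item is None:
--             result.append(-1)
--             continue
--         val, left, right = item
--         result.append(val)
--         if left is None and right is None:
--             continue
--         queue.append(left)
--         queue.append(right)
--     return result
-- ===== Notes on version B (the rewrite author's own statement) =====
-- stated objective: faster
-- what changed: B first recursively builds an explicit balanced-BST of node tuples from the sorted array, then does a level-order walk over that tree with an index-pointer queue, instead of A's single BFS loop that expands (lo,hi) index-range dicts on the fly and dequeues with list.pop(0).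
import Mathlib
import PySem

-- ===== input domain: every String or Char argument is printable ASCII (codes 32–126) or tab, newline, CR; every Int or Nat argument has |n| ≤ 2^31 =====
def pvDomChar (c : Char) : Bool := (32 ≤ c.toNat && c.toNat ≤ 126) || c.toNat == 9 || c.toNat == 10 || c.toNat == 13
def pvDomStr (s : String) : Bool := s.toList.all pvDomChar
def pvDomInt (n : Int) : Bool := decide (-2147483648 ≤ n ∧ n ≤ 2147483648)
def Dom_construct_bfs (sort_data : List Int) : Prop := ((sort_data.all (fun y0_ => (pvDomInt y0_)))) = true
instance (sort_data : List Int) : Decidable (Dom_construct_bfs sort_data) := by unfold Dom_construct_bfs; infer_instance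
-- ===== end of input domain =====

-- B builds the balanced BST explicitly by recursion, then walks it level-order with an
-- index-pointer queue, replacing A's on-the-fly range-dict BFS whose list.pop(0) is quadratic.

-- ===== PORT A =====
-- A's queue item: none = the -1 marker, some (val, leftRange, rightRange) = the dict.
-- get_child: val = sort_data[child_index] can only be out of range when the root access
-- already raised (excluded by Pre_); the port uses .getD 0 there, identically in both ports.
def getChild (rng : Int × Int) (sort_data : List Int) :
    Option (Int × (Int × Int) × (Int × Int)) :=
  if rng.1 > rng.2 then none
  else
    let ci := PySem.Int.floordiv (rng.1 + rng.2) 2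
    some ((PySem.List.pyGet? sort_data ci).getD 0, (rng.1, ci - 1), (ci + 1, rng.2))

-- the while-loop; fuel only makes it total (4*len+4 exceeds the ≤ 2*len+1 iterations)
def bfsA (sort_data : List Int) :
    Nat → List (Option (Int × (Int × Int) × (Int × Int))) → List Int → List Int
  | 0, _, result => result
  | _ + 1, [], result => result
  | fuel + 1, none :: rest, result => bfsA sort_data fuel rest (result ++ [-1])
  | fuel + 1, some (v, L, R) :: rest, result =>
    let lc := getChild L sort_data
    let rc := getChild R sort_data
    if lc = none ∧ rc = none then bfsA sort_data fuel rest (result ++ [v])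
    else bfsA sort_data fuel (rest ++ [lc, rc]) (result ++ [v])

def construct_bfs (sort_data : List Int) : List Int :=
  let n : Int := sort_data.length
  let mi := PySem.Int.floordiv n 2
  match PySem.List.pyGet? sort_data mi with
  | none => []   -- IndexError in Python (empty list); excluded by Pre_
  | some v =>
      bfsA sort_data (4 * sort_data.length + 4)
        [some (v, (0, mi - 1), (mi + 1, n - 1))] []

-- ===== PORT B =====
-- Source B's node tuple / None becomes a tree: leaf = Python None.
inductive BTree where
  | leaf : BTree
  | node : Int → BTree → BTree → BTree
deriving DecidableEq, Repr

-- Source B's recursive build(lo, hi)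
def buildTree (sort_data : List Int) (lo hi : Int) : BTree :=
  if lo > hi then BTree.leaf
  else
    let mid := PySem.Int.floordiv (lo + hi) 2
    BTree.node ((PySem.List.pyGet? sort_data mid).getD 0)
      (buildTree sort_data lo (mid - 1)) (buildTree sort_data (mid + 1) hi)
termination_by (hi + 1 - lo).toNat
decreasing_by
  · have := PySem.Int.floordiv_two_mid_bounds (lo := lo) (hi := hi) (by omega)
    omega
  · have := PySem.Int.floordiv_two_mid_bounds (lo := lo) (hi := hi) (by omega)
    omega

-- Source B's queue loop (index pointer over the growing list = pop from the front);
-- fuel only makes it total, as in bfsA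
def bfsB : Nat → List BTree → List Int → List Int
  | 0, _, result => result
  | _ + 1, [], result => result
  | fuel + 1, BTree.leaf :: rest, result => bfsB fuel rest (result ++ [-1])
  | fuel + 1, BTree.node v l r :: rest, result =>
    if l = BTree.leaf ∧ r = BTree.leaf then bfsB fuel rest (result ++ [v])
    else bfsB fuel (rest ++ [l, r]) (result ++ [v])

def construct_bfs_alt (sort_data : List Int) : List Int :=
  let n : Int := sort_data.length
  let mi := PySem.Int.floordiv n 2
  match PySem.List.pyGet? sort_data mi with
  | none => []   -- IndexError in Python (empty list); excluded by Pre_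
  | some v =>
      bfsB (4 * sort_data.length + 4)
        [BTree.node v (buildTree sort_data 0 (mi - 1))
                     (buildTree sort_data (mi + 1) (n - 1))] []

-- ===== PRECONDITION & SPEC =====
-- A raises IndexError on the empty list (sort_data[len//2]); B raises there too.
def Pre_construct_bfs (sort_data : List Int) : Prop := sort_data ≠ []
instance (sort_data : List Int) : Decidable (Pre_construct_bfs sort_data) := by
  unfold Pre_construct_bfs; infer_instance
def pvWitness_construct_bfs : List Int := [1, 2, 3]

def Spec_construct_bfs (sort_data : List Int) (out : List Int) : Prop :=
  out = construct_bfs_alt sort_data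
instance (sort_data : List Int) (out : List Int) : Decidable (Spec_construct_bfs sort_data out) := by
  unfold Spec_construct_bfs; infer_instance

-- ===== CLAIM (what is proved, stated in full; the proofs are below) =====
def Claim_equal_construct_bfs : Prop :=
  ∀ (sort_data : List Int), Dom_construct_bfs sort_data → Pre_construct_bfs sort_data →
    Spec_construct_bfs sort_data (construct_bfs sort_data)

-- ===== LEMMAS AND PROOFS =====
-- the simulation map: A's queue item ↦ B's queue item
def toTreeItem (sort_data : List Int) :
    Option (Int × (Int × Int) × (Int × Int)) → BTree
  | none => BTree.leaf
  | some (v, L, R) => BTree.node v (buildTree sort_data L.1 L.2) (buildTree sort_data R.1 R.2)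

lemma toTreeItem_getChild (sort_data : List Int) (a b : Int) :
    toTreeItem sort_data (getChild (a, b) sort_data) = buildTree sort_data a b := by
  rw [buildTree]
  by_cases h : a > b
  · simp [getChild, h, toTreeItem]
  · simp [getChild, h, toTreeItem]

lemma buildTree_eq_leaf_iff (sort_data : List Int) (a b : Int) :
    buildTree sort_data a b = BTree.leaf ↔ a > b := by
  rw [buildTree]
  by_cases h : a > b <;> simp [h]

lemma getChild_eq_none_iff (sort_data : List Int) (a b : Int) :
    getChild (a, b) sort_data = none ↔ a > b := by
  by_cases h : a > b <;> simp [getChild, h]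

lemma bfsA_eq_bfsB (sort_data : List Int) (fuel : Nat)
    (q : List (Option (Int × (Int × Int) × (Int × Int)))) (result : List Int) :
    bfsB fuel (q.map (toTreeItem sort_data)) result = bfsA sort_data fuel q result := by
  induction fuel generalizing q result with
  | zero => simp [bfsA, bfsB]
  | succ fuel ih =>
    match q with
    | [] => simp [bfsA, bfsB]
    | none :: rest => simpa [bfsA, bfsB, toTreeItem] using ih rest (result ++ [-1])
    | some (v, (a₁, b₁), (a₂, b₂)) :: rest =>
      simp only [List.map_cons, toTreeItem, bfsA, bfsB]
      have hL := toTreeItem_getChild sort_data a₁ b₁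
      have hR := toTreeItem_getChild sort_data a₂ b₂
      have hcond : (buildTree sort_data a₁ b₁ = BTree.leaf ∧ buildTree sort_data a₂ b₂ = BTree.leaf)
          ↔ (getChild (a₁, b₁) sort_data = none ∧ getChild (a₂, b₂) sort_data = none) := by
        rw [buildTree_eq_leaf_iff, buildTree_eq_leaf_iff,
            getChild_eq_none_iff, getChild_eq_none_iff]
      by_cases h : getChild (a₁, b₁) sort_data = none ∧ getChild (a₂, b₂) sort_data = none
      · rw [if_pos (hcond.mpr h), if_pos h]
        exact ih rest (result ++ [v])
      · rw [if_neg (fun hc => h (hcond.mp hc)), if_neg h]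
        have := ih (rest ++ [getChild (a₁, b₁) sort_data, getChild (a₂, b₂) sort_data])
          (result ++ [v])
        rw [List.map_append] at this
        simp only [List.map_cons, List.map_nil, hL, hR] at this
        exact this

-- ===== VERDICT (by name: the statement is the Claim_ definition above) =====
theorem construct_bfs_spec : Claim_equal_construct_bfs := by
  intro sort_data _ _
  unfold Spec_construct_bfs
  simp only [construct_bfs, construct_bfs_alt]
  cases hroot : PySem.List.pyGet? sort_data
      (PySem.Int.floordiv (sort_data.length : Int) 2) with
  | none => rfl
  | some v =>
    dsimp only
    rw [← bfsA_eq_bfsB sort_data]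
    simp [toTreeItem]
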